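-- pv_equiv track=rewrite | github.com/tomasvanagas/prime-research | experiments/other/deterministic_gap_recurrence.py | cloitre_primes
-- ===== SOURCE A (Python) =====
-- import math
--
-- def cloitre_primes(n_max):
--     """Test Cloitre's LCM recurrence."""
--     f = 1
--     primes = []
--     for n in range(2, n_max + 2):
--         f_new = f + math.lcm(n, f)
--         ratio = f_new // f - 1  # Should be a prime
--         primes.append(ratio)
--         f = f_new
--     return primes
-- ===== SOURCE B (Python) =====
-- def _factor(m):
--     """Prime factorization of m >= 1 by trial division: list of (p, exponent)."""
--     fac = []
--     d = 2
--     while d * d <= m: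
--         if m % d == 0:
--             a = 0
--             while m % d == 0:
--                 m //= d
--                 a += 1
--             fac.append((d, a))
--         d += 1
--     if m > 1:
--         fac.append((m, 1))
--     return fac
--
--
-- def cloitre_primes(n_max):
--     """Cloitre's LCM recurrence ratios, computed over the prime factorization
--     of f instead of f itself: exp maps each prime to its exponent in f, the
--     ratio f_new//f - 1 = n // gcd(n, f) is rebuilt from the exponents of n
--     that exceed those of f, and f *= ratio + 1 becomes adding the exponents
--     of ratio + 1.  No big integer is ever formed."""
--     exp = {}
--     out = []
--     for n in range(2, n_max + 2):
--         r = 1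
--         for p, a in _factor(n):
--             e = exp.get(p, 0)
--             if a > e:
--                 r *= p ** (a - e)
--         out.append(r)
--         for p, a in _factor(r + 1):
--             exp[p] = exp.get(p, 0) + a
--     return out
-- ===== Notes on version B (the rewrite author's own statement) =====
-- stated objective: faster
-- what changed: B never forms the big integer f: it maintains f's prime factorization in a dict, rebuilds each ratio n//gcd(n,f) from the exponents of n (trial-division factored) that exceed f's stored exponents, and updates the dict with the factorization of ratio+1, replacing A's bignum lcm and bignum division per step.
import Mathlib
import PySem

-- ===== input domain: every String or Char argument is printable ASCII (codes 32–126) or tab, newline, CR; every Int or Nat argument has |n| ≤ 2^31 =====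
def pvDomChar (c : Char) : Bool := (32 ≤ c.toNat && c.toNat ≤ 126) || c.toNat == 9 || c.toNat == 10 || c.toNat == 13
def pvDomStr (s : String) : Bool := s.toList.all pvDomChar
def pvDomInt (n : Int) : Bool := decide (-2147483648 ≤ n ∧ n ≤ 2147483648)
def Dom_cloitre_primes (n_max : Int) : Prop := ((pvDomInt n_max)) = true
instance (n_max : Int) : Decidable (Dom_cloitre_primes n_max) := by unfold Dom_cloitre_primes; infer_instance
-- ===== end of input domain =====

-- B replaces A's bignum recurrence (f_new = f + lcm(n,f); ratio = f_new//f - 1) by maintaining the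
-- prime factorization of f in a dict: each ratio is rebuilt from the trial-division factorization of n,
-- and f's update becomes adding the exponents of ratio+1; measured faster (asymptotically: no bignums).

-- ===== PORT A =====
def cloitre_primes (n_max : Int) : List Int :=
  ((PySem.List.pyRange 2 (n_max + 2) 1).foldl
    (fun (s : Int × List Int) n =>
      let f_new := s.1 + ((Int.lcm n s.1 : Nat) : Int)
      (f_new, s.2 ++ [PySem.Int.floordiv f_new s.1 - 1]))
    (1, ([] : List Int))).2

-- ===== PORT B =====
-- inner 'while m % d == 0: m //= d; a += 1' of _factor; returns (final m, a).
-- the fuel argument only makes the loop structurally terminating; every call below passes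
-- fuel ≥ the number of iterations the Python loop performs, so it is never exhausted.
def pvPullGo : Nat → Int → Int → Int × Int
  | 0, m, _ => (m, 0)
  | Nat.succ fuel, m, d =>
    if PySem.Int.mod m d = 0 then
      let r := pvPullGo fuel (PySem.Int.floordiv m d) d
      (r.1, r.2 + 1)
    else (m, 0)

-- outer 'while d * d <= m' loop of _factor (same fuel discipline)
def pvFactorGo : Nat → Int → Int → List (Int × Int)
  | 0, _, _ => []
  | Nat.succ fuel, m, d =>
    if d * d ≤ m then
      if PySem.Int.mod m d = 0 then
        let r := pvPullGo m.toNat m d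
        (d, r.2) :: pvFactorGo fuel r.1 (d + 1)
      else pvFactorGo fuel m (d + 1)
    else if 1 < m then [(m, 1)] else []

def pvFactor (m : Int) : List (Int × Int) := pvFactorGo ((2 * m).toNat + 1) m 2

def cloitre_primes_alt (n_max : Int) : List Int :=
  ((PySem.List.pyRange 2 (n_max + 2) 1).foldl
    (fun (s : PySem.Dict Int Int × List Int) n =>
      -- 'r *= p ** (a - e)' runs only under 'a > e', so the exponent is positive:
      -- '^ (… ).toNat' is exact there
      let r := (pvFactor n).foldl (fun r pa =>
          let e := s.1.getD pa.1 0
          if e < pa.2 then r * pa.1 ^ (pa.2 - e).toNat else r) 1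
      let d' := (pvFactor (r + 1)).foldl
          (fun d pa => d.insert pa.1 (d.getD pa.1 0 + pa.2)) s.1
      (d', s.2 ++ [r]))
    (PySem.Dict.empty, ([] : List Int))).2

-- ===== PRECONDITION & SPEC =====
def Spec_cloitre_primes (n_max : Int) (out : List Int) : Prop := out = cloitre_primes_alt n_max
instance (n_max : Int) (out : List Int) : Decidable (Spec_cloitre_primes n_max out) := by unfold Spec_cloitre_primes; infer_instance

-- ===== CLAIM (what is proved, stated in full; the proofs are below) =====
def Claim_equal_cloitre_primes : Prop := ∀ (n_max : Int), Dom_cloitre_primes n_max → Spec_cloitre_primes n_max (cloitre_primes n_max)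

-- ===== LEMMAS AND PROOFS =====

-- B's dict d stores exactly the prime factorization of f
def GoodDict (d : PySem.Dict Int Int) (f : ℕ) : Prop :=
  ∀ p : ℕ, d.getD (p : Int) 0 = (f.factorization p : Int)

-- l is the trial-division factorization of m: prime keys with their exact positive
-- exponents in m, no key twice, and every prime factor of m present
def FacList (m : ℕ) (l : List (Int × Int)) : Prop :=
  (∀ pa ∈ l, ∃ p : ℕ, pa.1 = (p : Int) ∧ p.Prime ∧ pa.2 = (m.factorization p : Int) ∧
      0 < m.factorization p) ∧
  (l.map Prod.fst).Nodup ∧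
  (∀ p : ℕ, p.Prime → p ∣ m → ((p : Int)) ∈ l.map Prod.fst)

theorem pvPullGo_spec : ∀ (fuel : ℕ), ∀ (m d : ℕ), m ≤ fuel → 0 < m → 2 ≤ d →
    ∃ (m' a : ℕ), pvPullGo fuel (m : Int) (d : Int) = ((m' : Int), (a : Int)) ∧
      m = d ^ a * m' ∧ ¬ d ∣ m' := by
  intro fuel
  induction fuel with
  | zero => intro m d hfuel hm hd; omega
  | succ fuel ih =>
    intro m d hfuel hm hd
    by_cases hdvd : d ∣ m
    · have hcond : PySem.Int.mod (m:Int) (d:Int) = 0 := by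
        rw [PySem.Int.mod_eq_zero_iff_dvd]
        exact_mod_cast hdvd
      rw [pvPullGo, if_pos hcond]
      have hfd : PySem.Int.floordiv (m:Int) (d:Int) = ((m / d : ℕ) : Int) :=
        PySem.Int.floordiv_natCast m d
      have hlt : m / d < m := Nat.div_lt_self hm (by omega)
      have hpos : 0 < m / d := Nat.div_pos (Nat.le_of_dvd hm hdvd) (by omega)
      obtain ⟨m', a, heq, hfac, hnd⟩ := ih (m / d) d (by omega) hpos hd
      refine ⟨m', a + 1, ?_, ?_, hnd⟩
      · rw [hfd, heq]; push_cast; ring_nf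
      · rw [pow_succ, mul_comm (d ^ a) d, mul_assoc, ← hfac, Nat.mul_div_cancel' hdvd]
    · have hcond : ¬ PySem.Int.mod (m:Int) (d:Int) = 0 := by
        intro hz
        rw [PySem.Int.mod_eq_zero_iff_dvd] at hz
        exact hdvd (by exact_mod_cast hz)
      rw [pvPullGo, if_neg hcond]
      exact ⟨m, 0, by norm_num, by simp, hdvd⟩

theorem pvFactorGo_spec : ∀ (fuel : ℕ), ∀ (m d : ℕ), 2 * m - d < fuel → 1 ≤ m → 2 ≤ d →
    (∀ p : ℕ, p.Prime → p ∣ m → d ≤ p) →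
    FacList m (pvFactorGo fuel (m : Int) (d : Int)) := by
  intro fuel
  induction fuel with
  | zero => intro m d hk hm hd hmin; omega
  | succ fuel ih =>
    intro m d hk hm hd hmin
    by_cases hguard : d * d ≤ m
    · have hdm : d ≤ m := le_trans (Nat.le_mul_of_pos_left d (by omega)) hguard
      rw [pvFactorGo, if_pos (by exact_mod_cast hguard)]
      by_cases hdvd : d ∣ m
      · rw [if_pos (show PySem.Int.mod (m:Int) (d:Int) = 0 by
          rw [PySem.Int.mod_eq_zero_iff_dvd]; exact_mod_cast hdvd)]
        obtain ⟨m', a, heq, hfac, hnd⟩ :=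
          pvPullGo_spec ((m : Int)).toNat m d (by omega) hm hd
        -- d is prime: no prime below d divides m, and d ∣ m
        have hdprime : d.Prime := by
          have h1 := Nat.minFac_prime (show d ≠ 1 by omega)
          have h2 : d.minFac ∣ m := dvd_trans (Nat.minFac_dvd d) hdvd
          have h3 := hmin d.minFac h1 h2
          have h4 := Nat.minFac_le (show 0 < d by omega)
          have : d.minFac = d := by omega
          exact this ▸ h1
        have hm' : 0 < m' := by
          rcases Nat.eq_zero_or_pos m' with h | h
          · subst h; simp at hfac; omega
          · exact h
        have ha : 0 < a := by
          rcases Nat.eq_zero_or_pos a with h | h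
          · subst h; simp at hfac; exact absurd (hfac ▸ hdvd) hnd
          · exact h
        have hm'dvd : m' ∣ m := ⟨d ^ a, by rw [hfac]; ring⟩
        have hm'le : 2 * m' ≤ m := by
          have hda : 2 ≤ d ^ a := le_trans hd (Nat.le_self_pow (by omega) d)
          nlinarith
        -- the exponent pulled out is the d-adic valuation of m
        have hfactd : m.factorization d = a := by
          rw [hfac, Nat.factorization_mul (by positivity) (by omega)]
          simp [hdprime.factorization_pow, Nat.factorization_eq_zero_of_not_dvd hnd]
        -- exponents of the remaining primes are unchanged in m'
        have hfactother : ∀ p : ℕ, p ≠ d → m.factorization p = m'.factorization p := by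
          intro p hp
          rw [hfac, Nat.factorization_mul (by positivity) (by omega)]
          simp [hdprime.factorization_pow, Ne.symm hp]
        have hrec : FacList m' (pvFactorGo fuel (m' : Int) ((d + 1 : ℕ) : Int)) := by
          apply ih m' (d + 1) (by omega) (by omega) (by omega)
          intro p hp hpd
          have hpm : p ∣ m := dvd_trans hpd hm'dvd
          have := hmin p hp hpm
          rcases Nat.lt_or_ge d p with h | h
          · omega
          · have : p = d := by omega
            exact absurd (this ▸ hpd) hnd
        rw [heq]
        have hcast : ((d : Int) + 1) = ((d + 1 : ℕ) : Int) := by push_cast; ring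
        rw [hcast]
        obtain ⟨hmem', hnd', hcomp'⟩ := hrec
        refine ⟨?_, ?_, ?_⟩
        · intro pa hpa
          rcases List.mem_cons.mp hpa with h | h
          · exact ⟨d, by rw [h], hdprime, by rw [h, hfactd], by omega⟩
          · obtain ⟨p, h1, h2, h3, h4⟩ := hmem' pa h
            have hpd : p ≠ d := by
              intro hc
              exact hnd (hc ▸ Nat.dvd_of_factorization_pos (by omega))
            exact ⟨p, h1, h2, by rw [h3, hfactother p hpd], by rw [hfactother p hpd]; exact h4⟩
        · simp only [List.map_cons]
          refine List.nodup_cons.mpr ⟨?_, hnd'⟩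
          intro hc
          obtain ⟨pa, hpa, hfst⟩ := List.mem_map.mp hc
          obtain ⟨p, h1, h2, h3, h4⟩ := hmem' pa hpa
          have hpd : p = d := by
            have := h1 ▸ hfst
            exact_mod_cast this
          exact hnd (hpd ▸ Nat.dvd_of_factorization_pos (by omega))
        · intro p hp hpd
          by_cases hpeq : p = d
          · simp [hpeq]
          · have : p ∣ m' := by
              rcases (Nat.Prime.dvd_mul hp).mp (hfac ▸ hpd) with h | h
              · exact absurd ((Nat.prime_dvd_prime_iff_eq hp hdprime).mp
                  (hp.dvd_of_dvd_pow h)) hpeq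
              · exact h
            simpa using Or.inr (by simpa using hcomp' p hp this)
      · rw [if_neg (show ¬ PySem.Int.mod (m:Int) (d:Int) = 0 by
          rw [PySem.Int.mod_eq_zero_iff_dvd]; exact fun h => hdvd (by exact_mod_cast h))]
        have hcast : ((d : Int) + 1) = ((d + 1 : ℕ) : Int) := by push_cast; ring
        rw [hcast]
        apply ih m (d + 1) (by omega) hm (by omega)
        intro p hp hpd
        have := hmin p hp hpd
        rcases Nat.lt_or_ge d p with h | h
        · omega
        · exact absurd ((show p = d by omega) ▸ hpd) hdvd
    · rw [pvFactorGo, if_neg (show ¬ (d : Int) * (d : Int) ≤ (m : Int) from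
        fun hc => hguard (by exact_mod_cast hc))]
      by_cases h1 : 1 < m
      · rw [if_pos (by exact_mod_cast h1)]
        have hmp : m.Prime := by
          by_contra hc
          have h2 := Nat.minFac_sq_le_self (by omega) hc
          have h3 := hmin m.minFac (Nat.minFac_prime (by omega)) (Nat.minFac_dvd m)
          nlinarith [sq_nonneg m.minFac, sq (m.minFac)]
        refine ⟨?_, by simp, ?_⟩
        · intro pa hpa
          rw [List.mem_singleton] at hpa
          refine ⟨m, by rw [hpa], hmp, by rw [hpa]; simp [hmp.factorization], by simp [hmp.factorization]⟩
        · intro p hp hpd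
          have : p = m := (Nat.prime_dvd_prime_iff_eq hp hmp).mp hpd
          simp [this]
      · have hm1 : m = 1 := by omega
        rw [if_neg (by omega)]
        subst hm1
        refine ⟨by simp, by simp, ?_⟩
        intro p hp hpd
        exact absurd (Nat.dvd_one.mp hpd ▸ hp) Nat.not_prime_one

theorem pvFactor_spec (m : ℕ) (hm : 1 ≤ m) : FacList m (pvFactor (m : Int)) := by
  have := pvFactorGo_spec ((2 * (m : Int)).toNat + 1) m 2 (by omega) hm (by omega)
    (fun p hp _ => hp.two_le)
  exact_mod_cast this

-- the ratio fold over the factorization of n computes n / gcd(n, f)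
-- a multiply-accumulate fold is the product of the mapped list
theorem foldl_mul_prod : ∀ (l : List (Int × Int)) (h : Int × Int → Int) (init : Int),
    l.foldl (fun r x => r * h x) init = init * (l.map h).prod := by
  intro l
  induction l with
  | nil => intro h init; simp
  | cons x t ih => intro h init; simp only [List.foldl_cons, List.map_cons, List.prod_cons, ih]; ring

-- the contribution of prime q to the ratio n / gcd(n, f)
def pvU (n f q : ℕ) : ℕ :=
  if f.factorization q < n.factorization q then q ^ (n.factorization q - f.factorization q)
  else 1

theorem r_fold_eq (n f : ℕ) (hn : 2 ≤ n) (hf : 1 ≤ f) (d : PySem.Dict Int Int)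
    (hd : GoodDict d f) (l : List (Int × Int)) (hl : FacList n l) :
    l.foldl (fun r pa =>
        let e := d.getD pa.1 0
        if e < pa.2 then r * pa.1 ^ (pa.2 - e).toNat else r) 1
      = ((n / n.gcd f : ℕ) : Int) := by
  obtain ⟨hmem, hnd, hcomp⟩ := hl
  have hn0 : n ≠ 0 := by omega
  have hf0 : f ≠ 0 := by omega
  have hbody : l.foldl (fun r pa =>
        let e := d.getD pa.1 0
        if e < pa.2 then r * pa.1 ^ (pa.2 - e).toNat else r) 1
      = l.foldl (fun r pa => r * ((pvU n f pa.1.toNat : ℕ) : Int)) 1 := by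
    apply PySem.List.foldl_congr_mem
    intro r pa hpa
    obtain ⟨p, h1, h2, h3, h4⟩ := hmem pa hpa
    rw [h1, h3, hd p]
    dsimp only [Int.toNat_natCast]
    rw [pvU]
    by_cases hlt : f.factorization p < n.factorization p
    · rw [if_pos (by exact_mod_cast hlt), if_pos hlt]
      rw [show ((n.factorization p : ℕ) : Int) - ((f.factorization p : ℕ) : Int)
            = (((n.factorization p - f.factorization p : ℕ) : ℕ) : Int) by omega]
      rw [Int.toNat_natCast]
      push_cast
      ring
    · rw [if_neg (by exact_mod_cast hlt), if_neg hlt, Nat.cast_one, mul_one]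
  rw [hbody, foldl_mul_prod]
  set L : List ℕ := l.map (fun pa => pa.1.toNat) with hL
  have hmap : l.map (fun pa => ((pvU n f pa.1.toNat : ℕ) : Int)) = L.map (fun q => ((pvU n f q : ℕ) : Int)) := by
    rw [hL, List.map_map]
    rfl
  rw [hmap, show (fun q : ℕ => ((pvU n f q : ℕ) : Int)) = (fun q : ℕ => (q : Int)) ∘ (pvU n f)
    from rfl, ← List.map_map, ← Nat.cast_list_prod, one_mul]
  norm_cast
  -- facts about the key list L
  have hLmem : ∀ q ∈ L, q.Prime ∧ 0 < n.factorization q := by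
    intro q hq
    obtain ⟨pa, hpa, hq'⟩ := List.mem_map.mp hq
    obtain ⟨p, h1, h2, h3, h4⟩ := hmem pa hpa
    have : q = p := by rw [← hq', h1]; simp
    exact this ▸ ⟨h2, h4⟩
  have hLnd : L.Nodup := by
    rw [hL, show (fun pa : Int × Int => pa.1.toNat) = Int.toNat ∘ Prod.fst by rfl,
      ← List.map_map]
    apply List.Nodup.map_on ?_ hnd
    intro x hx y hy hxy
    obtain ⟨pax, hpax, hx'⟩ := List.mem_map.mp hx
    obtain ⟨px, g1, -, -, -⟩ := hmem pax hpax
    obtain ⟨pay, hpay, hy'⟩ := List.mem_map.mp hy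
    obtain ⟨py, g1', -, -, -⟩ := hmem pay hpay
    rw [← hx', ← hy', g1, g1'] at hxy ⊢
    simp only [Int.toNat_natCast] at hxy
    exact_mod_cast hxy
  have hLfin : L.toFinset = n.primeFactors := by
    ext q
    simp only [List.mem_toFinset, Nat.mem_primeFactors]
    constructor
    · intro hq
      obtain ⟨hq1, hq2⟩ := hLmem q hq
      exact ⟨hq1, Nat.dvd_of_factorization_pos (by omega), hn0⟩
    · rintro ⟨hq1, hq2, -⟩
      have := hcomp q hq1 hq2
      obtain ⟨pa, hpa, hfst⟩ := List.mem_map.mp this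
      rw [hL]
      exact List.mem_map.mpr ⟨pa, hpa, by rw [hfst]; simp⟩
  rw [← List.prod_toFinset (pvU n f) hLnd, hLfin]
  -- the mathematical identity: ∏_{p ∣ n} u p = n / gcd n f
  have hgdvd : n.gcd f ∣ n := Nat.gcd_dvd_left n f
  set x := n / n.gcd f with hx
  have hg0 : 0 < n.gcd f := Nat.gcd_pos_of_pos_left f (by omega)
  have hx0 : x ≠ 0 := by
    have : 0 < x := Nat.div_pos (Nat.le_of_dvd (by omega) hgdvd) hg0
    omega
  have hxdvd : x ∣ n := Nat.div_dvd_of_dvd hgdvd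
  have hxfact : ∀ q : ℕ, x.factorization q
      = n.factorization q - min (n.factorization q) (f.factorization q) := by
    intro q
    rw [hx, Nat.factorization_div hgdvd, Nat.factorization_gcd hn0 hf0]
    simp [Finsupp.inf_apply]
  have hself := Nat.prod_factorization_pow_eq_self hx0
  rw [Finsupp.prod] at hself
  rw [Nat.support_factorization] at hself
  have hsub : x.primeFactors ⊆ n.primeFactors := Nat.primeFactors_mono hxdvd hn0
  calc ∏ q ∈ n.primeFactors, pvU n f q
      = ∏ q ∈ n.primeFactors, q ^ x.factorization q := by
        apply Finset.prod_congr rfl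
        intro q hq
        rw [pvU, hxfact q]
        by_cases hlt : f.factorization q < n.factorization q
        · rw [if_pos hlt, min_eq_right (by omega)]
        · rw [if_neg hlt, min_eq_left (by omega), Nat.sub_self, pow_zero]
    _ = ∏ q ∈ x.primeFactors, q ^ x.factorization q := by
        symm
        apply Finset.prod_subset hsub
        intro q _ hq
        have : x.factorization q = 0 := by
          by_contra hc
          exact hq (Nat.support_factorization x ▸ Finsupp.mem_support_iff.mpr hc)
        rw [this, pow_zero]
    _ = x := hself

-- the insert fold adds the factorization of s to the dict
-- a key not in the list is untouched by the insert fold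
theorem fold_ins_not_mem : ∀ (l : List (Int × Int)) (d : PySem.Dict Int Int) (q : Int),
    q ∉ l.map Prod.fst →
    (l.foldl (fun d pa => d.insert pa.1 (d.getD pa.1 0 + pa.2)) d).getD q 0 = d.getD q 0 := by
  intro l
  induction l with
  | nil => intro d q _; rfl
  | cons pa t ih =>
    intro d q hq
    simp only [List.map_cons, List.mem_cons, not_or] at hq
    simp only [List.foldl_cons]
    rw [ih _ q hq.2, PySem.Dict.getD_insert_of_ne _ _ _ hq.1]

-- a key occurring once in the list gets its exponent added
theorem fold_ins_mem : ∀ (l : List (Int × Int)) (d : PySem.Dict Int Int) (p v : Int),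
    (l.map Prod.fst).Nodup → (p, v) ∈ l →
    (l.foldl (fun d pa => d.insert pa.1 (d.getD pa.1 0 + pa.2)) d).getD p 0 = d.getD p 0 + v := by
  intro l
  induction l with
  | nil => intro d p v _ h; cases h
  | cons pa t ih =>
    intro d p v hnd hmem
    simp only [List.map_cons, List.nodup_cons] at hnd
    simp only [List.foldl_cons]
    rcases List.mem_cons.mp hmem with h | h
    · have hp : pa.1 = p := by rw [← h]
      have hv : pa.2 = v := by rw [← h]
      have hpt : p ∉ t.map Prod.fst := by rw [← hp]; exact hnd.1
      rw [fold_ins_not_mem t _ p hpt, hp, hv, PySem.Dict.getD_insert_self]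
    · have hpne : p ≠ pa.1 := by
        intro hc
        exact hnd.1 (hc ▸ List.mem_map.mpr ⟨(p, v), h, rfl⟩)
      rw [ih _ p v hnd.2 h, PySem.Dict.getD_insert_of_ne _ _ _ hpne]

theorem upd_fold_good (f s : ℕ) (hf : 1 ≤ f) (hs : 1 ≤ s) (d : PySem.Dict Int Int)
    (hd : GoodDict d f) (l : List (Int × Int)) (hl : FacList s l) :
    GoodDict (l.foldl (fun d pa => d.insert pa.1 (d.getD pa.1 0 + pa.2)) d) (f * s) := by
  obtain ⟨hmem, hnd, hcomp⟩ := hl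
  intro q
  have hfs : (f * s).factorization q = f.factorization q + s.factorization q := by
    rw [Nat.factorization_mul (by omega) (by omega)]; simp
  by_cases hq : 0 < s.factorization q
  · have hqp : q.Prime := Nat.prime_of_mem_primeFactors
      (Nat.support_factorization s ▸ Finsupp.mem_support_iff.mpr (by omega))
    have hkey : ((q : Int)) ∈ l.map Prod.fst := hcomp q hqp (Nat.dvd_of_factorization_pos (by omega))
    obtain ⟨pa, hpa, hfst⟩ := List.mem_map.mp hkey
    obtain ⟨p, h1, h2, h3, h4⟩ := hmem pa hpa
    have hpq : p = q := by
      have := h1.symm.trans hfst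
      exact_mod_cast this
    have hpair : ((q : Int), ((s.factorization q : ℕ) : Int)) ∈ l := by
      have hpa2 : pa = ((q : Int), ((s.factorization q : ℕ) : Int)) :=
        Prod.ext_iff.mpr ⟨hfst, by rw [h3, hpq]⟩
      exact hpa2 ▸ hpa
    rw [fold_ins_mem l d _ _ hnd hpair, hd q, hfs]
    push_cast; ring
  · have hkey : ((q : Int)) ∉ l.map Prod.fst := by
      intro hc
      obtain ⟨pa, hpa, hfst⟩ := List.mem_map.mp hc
      obtain ⟨p, h1, h2, h3, h4⟩ := hmem pa hpa
      have hpq : p = q := by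
        have := h1.symm.trans hfst
        exact_mod_cast this
      subst hpq
      omega
    rw [fold_ins_not_mem l d _ hkey, hd q, hfs]
    omega

theorem pv_gcd_pos (n f : Int) (hn : 2 ≤ n) :
    0 < ((Int.gcd n f : Nat) : Int) := by
  have : Int.gcd n f ≠ 0 := by
    intro h
    rcases Int.gcd_eq_zero_iff.mp h with ⟨h1, _⟩
    omega
  omega

theorem pv_lcm_eq (n f : Int) (hn : 2 ≤ n) (hf : 1 ≤ f) :
    ((Int.lcm n f : Nat) : Int)
      = f * PySem.Int.floordiv n ((Int.gcd n f : Nat) : Int) := by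
  have hg0 : 0 < ((Int.gcd n f : Nat) : Int) := pv_gcd_pos n f hn
  have hdvd : ((Int.gcd n f : Nat) : Int) ∣ n := Int.gcd_dvd_left n f
  have hr : PySem.Int.floordiv n ((Int.gcd n f : Nat) : Int) * ((Int.gcd n f : Nat) : Int) = n := by
    rw [PySem.Int.floordiv_eq_ediv_of_pos hg0]
    exact Int.ediv_mul_cancel hdvd
  have hLg : ((Int.gcd n f : Nat) : Int) * ((Int.lcm n f : Nat) : Int) = n * f := by
    have h := congrArg (fun k : Nat => (k : Int)) (Int.gcd_mul_lcm n f)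
    push_cast at h
    rw [h, abs_of_nonneg (by omega : (0:Int) ≤ n), abs_of_nonneg (by omega : (0:Int) ≤ f)]
  apply mul_left_cancel₀ (a := ((Int.gcd n f : Nat) : Int)) (by omega)
  rw [hLg]
  nlinarith [hr]

theorem pv_fnew_eq (n f : Int) (hn : 2 ≤ n) (hf : 1 ≤ f) :
    f + ((Int.lcm n f : Nat) : Int)
      = f * (PySem.Int.floordiv n ((Int.gcd n f : Nat) : Int) + 1) := by
  rw [pv_lcm_eq n f hn hf]; ring

theorem pv_ratio_eq (n f : Int) (hn : 2 ≤ n) (hf : 1 ≤ f) :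
    PySem.Int.floordiv (f + ((Int.lcm n f : Nat) : Int)) f - 1
      = PySem.Int.floordiv n ((Int.gcd n f : Nat) : Int) := by
  rw [pv_lcm_eq n f hn hf]
  have hf0 : (0 : Int) < f := by omega
  rw [PySem.Int.floordiv_eq_ediv_of_pos hf0]
  have h1 : f + f * PySem.Int.floordiv n ((Int.gcd n f : Nat) : Int)
      = f * (1 + PySem.Int.floordiv n ((Int.gcd n f : Nat) : Int)) := by ring
  rw [h1, Int.mul_ediv_cancel_left _ (by omega)]
  ring

-- A's per-step ratio, as the Nat value n / gcd(n, f)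
theorem pv_ratio_nat (n f : Int) (hn : 2 ≤ n) (hf : 1 ≤ f) :
    PySem.Int.floordiv (f + ((Int.lcm n f : Nat) : Int)) f - 1
      = ((n.toNat / n.toNat.gcd f.toNat : ℕ) : Int) := by
  rw [pv_ratio_eq n f hn hf]
  have hgcd : Int.gcd n f = n.toNat.gcd f.toNat := by
    unfold Int.gcd
    congr 1 <;> omega
  have h2 := PySem.Int.floordiv_natCast n.toNat (n.toNat.gcd f.toNat)
  rw [show ((n.toNat : ℕ) : Int) = n from by omega] at h2
  rw [hgcd]
  exact h2

theorem pv_loop_eq (k : Nat) : ∀ (m n f : Int) (d : PySem.Dict Int Int) (acc : List Int),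
    (m + 2 - n).toNat = k → 2 ≤ n → 1 ≤ f → GoodDict d f.toNat →
    ((PySem.List.pyRange n (m + 2) 1).foldl
      (fun (s : Int × List Int) n =>
        let f_new := s.1 + ((Int.lcm n s.1 : Nat) : Int)
        (f_new, s.2 ++ [PySem.Int.floordiv f_new s.1 - 1]))
      (f, acc)).2
    = ((PySem.List.pyRange n (m + 2) 1).foldl
        (fun (s : PySem.Dict Int Int × List Int) n =>
          let r := (pvFactor n).foldl (fun r pa =>
              let e := s.1.getD pa.1 0
              if e < pa.2 then r * pa.1 ^ (pa.2 - e).toNat else r) 1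
          let d' := (pvFactor (r + 1)).foldl
              (fun d pa => d.insert pa.1 (d.getD pa.1 0 + pa.2)) s.1
          (d', s.2 ++ [r]))
        (d, acc)).2 := by
  induction k with
  | zero =>
    intro m n f d acc hk hn hf hgd
    rw [PySem.List.pyRange_one_eq_nil (by omega)]
    simp only [List.foldl_nil]
  | succ k ih =>
    intro m n f d acc hk hn hf hgd
    have hlt : n < m + 2 := by omega
    rw [PySem.List.pyRange_one_cons hlt]
    simp only [List.foldl_cons]
    have hn2 : 2 ≤ n.toNat := by omega
    have hf1 : 1 ≤ f.toNat := by omega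
    have hnn : ((n.toNat : ℕ) : Int) = n := by omega
    have hfn : ((f.toNat : ℕ) : Int) = f := by omega
    set r0 : ℕ := n.toNat / n.toNat.gcd f.toNat with hr0
    have hg0 : 0 < n.toNat.gcd f.toNat := Nat.gcd_pos_of_pos_left f.toNat (by omega)
    have hr1 : 1 ≤ r0 := Nat.div_pos (Nat.le_of_dvd (by omega) (Nat.gcd_dvd_left _ _)) hg0
    -- B's computed ratio is r0
    have hrB : (pvFactor n).foldl (fun r pa =>
          let e := d.getD pa.1 0
          if e < pa.2 then r * pa.1 ^ (pa.2 - e).toNat else r) 1 = ((r0 : ℕ) : Int) := by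
      rw [← hnn]
      exact r_fold_eq n.toNat f.toNat hn2 hf1 d hgd _ (pvFactor_spec n.toNat (by omega))
    -- A's appended ratio is r0 and its new f is f * (r0 + 1)
    have hrA := pv_ratio_nat n f hn hf
    have hfnew := pv_fnew_eq n f hn hf
    have hfd : PySem.Int.floordiv n ((Int.gcd n f : Nat) : Int) = ((r0 : ℕ) : Int) := by
      rw [← pv_ratio_eq n f hn hf, hrA]
    have hfr : f + ((Int.lcm n f : Nat) : Int) = ((f.toNat * (r0 + 1) : ℕ) : Int) := by
      rw [hfnew, hfd]
      push_cast
      rw [hfn]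
    rw [hrA, hrB, hfr]
    have hgd' : GoodDict ((pvFactor (((r0 : ℕ) : Int) + 1)).foldl
        (fun d pa => d.insert pa.1 (d.getD pa.1 0 + pa.2)) d)
        (((f.toNat * (r0 + 1) : ℕ) : Int)).toNat := by
      rw [Int.toNat_natCast, show (((r0 : ℕ) : Int) + 1) = (((r0 + 1 : ℕ) : ℕ) : Int) by push_cast; ring]
      exact upd_fold_good f.toNat (r0 + 1) hf1 (by omega) d hgd _ (pvFactor_spec (r0 + 1) (by omega))
    exact ih m (n + 1) _ _ (acc ++ [((r0 : ℕ) : Int)]) (by omega) (by omega)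
      (by have := Nat.mul_pos (show 0 < f.toNat by omega) (show 0 < r0 + 1 by omega); omega) hgd'

-- ===== VERDICT (by name: the statement is the Claim_ definition above) =====
theorem cloitre_primes_spec : Claim_equal_cloitre_primes := by
  intro n_max _hdom
  unfold Spec_cloitre_primes cloitre_primes cloitre_primes_alt
  exact pv_loop_eq (n_max + 2 - 2).toNat n_max 2 1 PySem.Dict.empty [] rfl (by omega) (by omega)
    (fun p => by simp [PySem.Dict.getD_empty, Nat.factorization_one])
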